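-- pv_equiv track=rewrite | github.com/viktoriaDEVV/AOIS | lab3/minimising.py | merge_parts
-- ===== SOURCE A (Python) =====
-- def merge_parts(parts):
--     merged = []
--     used = set()
--     for i in range(len(parts)):
--         part1 = parts[i].split()
--         for j in range(i + 1, len(parts)):
--             part2 = parts[j].split()
--             if len(part1) != len(part2):
--                 continue
--             different_var = [(x, y) for x, y in zip(part1, part2) if x != y]
--             if len(different_var) == 1 and (
--                     (different_var[0][0].startswith('!') and different_var[0][1] == different_var[0][0][1:]) or
--                     (different_var[0][1].startswith('!') and different_var[0][0] == different_var[0][1][1:])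
--             ):
--                 differences = [x != y for x, y in zip(part1, part2)]
--                 merged_part = [x if not diff else '' for x, diff in zip(part1, differences)]
--                 merged.append(' '.join(filter(bool, merged_part)))
--                 used.add(i)
--                 used.add(j)
--     for k in range(len(parts)):
--         if k not in used:
--             merged.append(parts[k])
--
--     unique_elements = set()
--     final_result = []
--
--     for elem in merged:
--         if elem not in unique_elements:
--             unique_elements.add(elem)
--             final_result.append(elem)
--
--     return final_result
-- ===== SOURCE B (Python) =====
-- def merge_parts(parts):
--     # Hash-index terms by (position, prefix, suffix, token) so one-variable-complement
--     # partners are found by O(1) lookups instead of comparing every pair of parts.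
--     toks = [p.split() for p in parts]
--     entries = [((p, tuple(ts[:p]), tuple(ts[p + 1:]), t), j)
--                for j, ts in enumerate(toks) for p, t in enumerate(ts)]
--     index = {}
--     for key, j in entries:
--         index.setdefault(key, []).append(j)
--     merged = []
--     used = set()
--     for i, ts in enumerate(toks):
--         partners = set()
--         for p, t in enumerate(ts):
--             cands = ['!' + t] + ([t[1:]] if t.startswith('!') else [])
--             for c in cands:
--                 for j in index.get((p, tuple(ts[:p]), tuple(ts[p + 1:]), c), []):
--                     if j > i:
--                         partners.add(j)
--         for j in sorted(partners):
--             merged.append(' '.join(x for x, y in zip(ts, toks[j]) if x == y))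
--             used.add(i)
--             used.add(j)
--     for k in range(len(parts)):
--         if k not in used:
--             merged.append(parts[k])
--     seen = set()
--     out = []
--     for e in merged:
--         if e not in seen:
--             seen.add(e)
--             out.append(e)
--     return out
-- ===== Notes on version B (the rewrite author's own statement) =====
-- stated objective: faster
-- what changed: Replaces A's O(n^2) all-pairs token comparison with a dictionary that indexes every part by (position, prefix, suffix, token), so each part finds its one-complemented-variable partners by O(1) hash lookups; partner indices are then sorted per part to reproduce A's emission order exactly.
import Mathlib
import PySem

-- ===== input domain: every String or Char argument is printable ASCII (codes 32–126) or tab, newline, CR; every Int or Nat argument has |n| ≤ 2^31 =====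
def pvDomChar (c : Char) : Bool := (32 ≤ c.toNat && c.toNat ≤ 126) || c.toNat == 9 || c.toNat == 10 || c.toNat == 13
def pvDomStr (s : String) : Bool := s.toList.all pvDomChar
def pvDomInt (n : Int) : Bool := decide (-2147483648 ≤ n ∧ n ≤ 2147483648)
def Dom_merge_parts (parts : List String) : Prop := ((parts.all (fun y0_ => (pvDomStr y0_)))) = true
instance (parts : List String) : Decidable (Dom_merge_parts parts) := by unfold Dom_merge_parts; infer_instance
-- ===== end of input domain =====

-- B replaces A's quadratic all-pairs scan with a hash index keyed by
-- (position, prefix, suffix, token), finding one-complement partners by lookups (faster in a timing run).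

-- ===== PORT A =====
-- inner j-loop body of A (part1 is the pre-split parts[i])
def pvA_inner (parts : List String) (part1 : List String) (i : Int)
    (st : List String × PySem.Set Int) (j : Int) : List String × PySem.Set Int :=
  let part2 := PySem.Str.split₀ (PySem.List.pyGetD parts j "")
  if part1.length != part2.length then st
  else
    let different_var := (part1.zip part2).filter (fun xy => xy.1 != xy.2)
    if different_var.length == 1 &&
        (match different_var.head? with
         | some (x, y) =>
           (PySem.Str.startswith x "!" && (y == PySem.Str.slice x (some 1) none)) ||
           (PySem.Str.startswith y "!" && (x == PySem.Str.slice y (some 1) none))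
         | none => false) then
      let differences := (part1.zip part2).map (fun xy => xy.1 != xy.2)
      let merged_part := (part1.zip differences).map (fun xd => if !xd.2 then xd.1 else "")
      (st.1 ++ [PySem.Str.join " " (merged_part.filter (fun s => !(s == "")))],
       PySem.Set.add (PySem.Set.add st.2 i) j)
    else st

def pvA_outer (parts : List String) (st : List String × PySem.Set Int) (i : Int) :
    List String × PySem.Set Int :=
  (PySem.List.pyRange (i + 1) (PySem.List.len parts)).foldl
    (pvA_inner parts (PySem.Str.split₀ (PySem.List.pyGetD parts i "")) i) st

def pvA_dedup (st : PySem.Set String × List String) (elem : String) :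
    PySem.Set String × List String :=
  if st.1.contains elem then st else (PySem.Set.add st.1 elem, st.2 ++ [elem])

def merge_parts (parts : List String) : List String :=
  let st := (PySem.List.pyRange 0 (PySem.List.len parts)).foldl (pvA_outer parts)
    ([], PySem.Set.empty)
  let merged := (PySem.List.pyRange 0 (PySem.List.len parts)).foldl
    (fun acc k => if st.2.contains k then acc else acc ++ [PySem.List.pyGetD parts k ""]) st.1
  (merged.foldl pvA_dedup (PySem.Set.empty, [])).2

-- ===== PORT B =====
-- the index key (p, tuple(ts[:p]), tuple(ts[p+1:]), t)
def pvB_key (ts : List String) (p : Int) (t : String) :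
    Int × List String × List String × String :=
  (p, PySem.List.slice ts none (some p), PySem.List.slice ts (some (p + 1)) none, t)

def pvB_entries (toks : List (List String)) :
    List ((Int × List String × List String × String) × Int) :=
  (PySem.List.enumerate toks).flatMap (fun jts =>
    (PySem.List.enumerate jts.2).map (fun pt => (pvB_key jts.2 pt.1 pt.2, jts.1)))

def pvB_index (toks : List (List String)) :
    PySem.Dict (Int × List String × List String × String) (List Int) :=
  (pvB_entries toks).foldl (fun d e => d.modify e.1 [] (· ++ [e.2])) PySem.Dict.empty

def pvB_cands (t : String) : List String :=
  ["!" ++ t] ++ (if PySem.Str.startswith t "!" then [PySem.Str.slice t (some 1) none] else [])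

def pvB_partners (index : PySem.Dict (Int × List String × List String × String) (List Int))
    (i : Int) (ts : List String) : PySem.Set Int :=
  (PySem.List.enumerate ts).foldl (fun pr pt =>
    (pvB_cands pt.2).foldl (fun pr c =>
      (index.getD (pvB_key ts pt.1 c) []).foldl (fun pr j => if i < j then pr.add j else pr) pr)
      pr) PySem.Set.empty

def pvB_emit (toks : List (List String)) (i : Int) (ts : List String)
    (st : List String × PySem.Set Int) (j : Int) : List String × PySem.Set Int :=
  (st.1 ++ [PySem.Str.join " "
      (((ts.zip (PySem.List.pyGetD toks j [])).filter (fun xy => xy.1 == xy.2)).map (·.1))],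
   PySem.Set.add (PySem.Set.add st.2 i) j)

def pvB_body (toks : List (List String))
    (index : PySem.Dict (Int × List String × List String × String) (List Int))
    (st : List String × PySem.Set Int) (its : Int × List String) :
    List String × PySem.Set Int :=
  (PySem.List.sorted (pvB_partners index its.1 its.2) (fun x => x) false).foldl
    (pvB_emit toks its.1 its.2) st

def pvB_dedup (st : PySem.Set String × List String) (elem : String) :
    PySem.Set String × List String :=
  if st.1.contains elem then st else (PySem.Set.add st.1 elem, st.2 ++ [elem])

def merge_parts_alt (parts : List String) : List String :=
  let toks := parts.map PySem.Str.split₀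
  let index := pvB_index toks
  let st := (PySem.List.enumerate toks).foldl (pvB_body toks index) ([], PySem.Set.empty)
  let merged := (PySem.List.pyRange 0 (PySem.List.len parts)).foldl
    (fun acc k => if st.2.contains k then acc else acc ++ [PySem.List.pyGetD parts k ""]) st.1
  (merged.foldl pvB_dedup (PySem.Set.empty, [])).2

-- ===== PRECONDITION & SPEC =====
def Spec_merge_parts (parts : List String) (out : List String) : Prop := out = merge_parts_alt parts
instance (parts : List String) (out : List String) : Decidable (Spec_merge_parts parts out) := by unfold Spec_merge_parts; infer_instance

-- ===== CLAIM (what is proved, stated in full; the proofs are below) =====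
def Claim_equal_merge_parts : Prop := ∀ (parts : List String), Dom_merge_parts parts → Spec_merge_parts parts (merge_parts parts)

-- ===== LEMMAS AND PROOFS =====

theorem pv_go_ne_nil (cs : List Char) : ∀ (cur : List Char) (acc : List (List Char)),
    (∀ l ∈ acc, l ≠ []) → ∀ l ∈ PySem.Chars.split₀.go cs cur acc, l ≠ [] := by
  induction cs with
  | nil =>
    intro cur acc hacc l hl
    simp only [PySem.Chars.split₀.go] at hl
    split at hl
    · exact hacc l (List.mem_reverse.mp hl)
    · rename_i hcur
      rcases List.mem_cons.mp (List.mem_reverse.mp hl) with h | h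
      · subst h
        simp only [ne_eq, List.reverse_eq_nil_iff]
        simpa [List.isEmpty_iff] using hcur
      · exact hacc l h
  | cons c rest ih =>
    intro cur acc hacc l hl
    simp only [PySem.Chars.split₀.go] at hl
    split at hl
    · split at hl
      · exact ih [] acc hacc l hl
      · rename_i hcur
        refine ih [] _ ?_ l hl
        intro l' hl'
        rcases List.mem_cons.mp hl' with h | h
        · subst h
          simp only [ne_eq, List.reverse_eq_nil_iff]
          simpa [List.isEmpty_iff] using hcur
        · exact hacc l' h
    · exact ih (c :: cur) acc hacc l hl

theorem pv_tok_ne_nil (s : String) : ∀ t ∈ PySem.Str.split₀ s, t ≠ "" := by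
  intro t ht he
  have h1 : t.toList ∈ (PySem.Str.split₀ s).map String.toList := List.mem_map_of_mem ht
  rw [PySem.Str.split₀_map_toList] at h1
  have h2 : t.toList ≠ [] := by
    have : PySem.Chars.split₀ s.toList = PySem.Chars.split₀.go s.toList [] [] := rfl
    rw [this] at h1
    exact pv_go_ne_nil s.toList [] [] (by simp) t.toList h1
  subst he
  simp at h2


def pvRel (x y : String) : Prop :=
  y.toList = '!' :: x.toList ∨ x.toList = '!' :: y.toList

theorem pvRel_ne {x y : String} (h : pvRel x y) : x ≠ y := by
  intro he; subst he
  rcases h with h | h <;>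
  · have := congrArg List.length h
    simp at this

theorem pv_startswith_slice_iff (x y : String) :
    (PySem.Str.startswith x "!" && (y == PySem.Str.slice x (some 1) none)) = true ↔
      x.toList = '!' :: y.toList := by
  have hbang : ("!" : String).toList = ['!'] := by decide
  have hsl : (PySem.Str.slice x (some 1) none).toList = x.toList.drop 1 := by
    rw [PySem.Str.toList_slice, PySem.Chars.slice_eq_listSlice,
      PySem.List.slice_from x.toList (by norm_num : (0:Int) ≤ 1)]
    rfl
  constructor
  · rintro h
    rw [Bool.and_eq_true] at h
    obtain ⟨h1, h2⟩ := h
    rw [PySem.Str.startswith_eq, hbang, PySem.Chars.startswith_iff] at h1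
    obtain ⟨u, hu⟩ := h1
    have hy : y = PySem.Str.slice x (some 1) none := by
      exact beq_iff_eq.mp h2
    have : y.toList = x.toList.drop 1 := by rw [hy, hsl]
    rw [← hu] at this ⊢
    simp at this
    simp [this]
  · intro h
    rw [Bool.and_eq_true]
    constructor
    · rw [PySem.Str.startswith_eq, hbang, PySem.Chars.startswith_iff]
      exact ⟨y.toList, by rw [h]; rfl⟩
    · rw [beq_iff_eq]
      apply String.toList_inj.mp
      rw [hsl, h]
      simp

theorem pv_zip_self_filter_ne (l : List String) :
    (l.zip l).filter (fun xy => xy.1 != xy.2) = [] := by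
  induction l with
  | nil => rfl
  | cons a l ih => simp [List.zip_cons_cons, ih]

theorem pv_zip_self_filter_eq (l : List String) :
    (l.zip l).filter (fun xy => xy.1 == xy.2) = l.zip l := by
  induction l with
  | nil => rfl
  | cons a l ih => simp [List.zip_cons_cons, ih]

theorem pv_zipfilter_singleton (pre rest : List String) (x y : String) (hne : x ≠ y) :
    (((pre ++ x :: rest).zip (pre ++ y :: rest)).filter (fun xy => xy.1 != xy.2)) = [(x, y)] := by
  rw [List.zip_append rfl]
  rw [List.filter_append, pv_zip_self_filter_ne]
  simp [List.zip_cons_cons, hne, pv_zip_self_filter_ne, bne_iff_ne]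

theorem pv_zipfilter_nil_inv (t1 t2 : List String) (hlen : t1.length = t2.length)
    (h : (t1.zip t2).filter (fun xy => xy.1 != xy.2) = []) : t1 = t2 := by
  induction t1 generalizing t2 with
  | nil => cases t2 with
    | nil => rfl
    | cons b t2 => simp at hlen
  | cons a t1 ih =>
    cases t2 with
    | nil => simp at hlen
    | cons b t2 =>
      rw [List.zip_cons_cons, List.filter_cons] at h
      by_cases hab : a = b
      · subst hab
        simp only [bne_self_eq_false, Bool.false_eq_true, if_false] at h
        rw [ih t2 (by simpa using hlen) h]
      · rw [if_pos (by simp [bne_iff_ne, hab])] at h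
        simp at h

theorem pv_zipfilter_singleton_inv (t1 t2 : List String) (hlen : t1.length = t2.length)
    (x y : String) (h : (t1.zip t2).filter (fun xy => xy.1 != xy.2) = [(x, y)]) :
    ∃ pre rest, t1 = pre ++ x :: rest ∧ t2 = pre ++ y :: rest := by
  induction t1 generalizing t2 with
  | nil =>
    cases t2 with
    | nil => simp at h
    | cons b t2 => simp at hlen
  | cons a t1 ih =>
    cases t2 with
    | nil => simp at hlen
    | cons b t2 =>
      rw [List.zip_cons_cons, List.filter_cons] at h
      by_cases hab : a = b
      · subst hab
        simp only [bne_self_eq_false, Bool.false_eq_true, if_false] at h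
        obtain ⟨pre, rest, h1, h2⟩ := ih t2 (by simpa using hlen) h
        exact ⟨a :: pre, rest, by simp [h1], by simp [h2]⟩
      · rw [if_pos (by simp [bne_iff_ne, hab])] at h
        simp only [List.cons.injEq, Prod.mk.injEq] at h
        obtain ⟨⟨hx, hy⟩, htail⟩ := h
        have := pv_zipfilter_nil_inv t1 t2 (by simpa using hlen) htail
        exact ⟨[], t2, by simp [hx, this], by simp [hy]⟩

def pvMatch (ts1 ts2 : List String) : Prop :=
  ∃ pre x y rest, ts1 = pre ++ x :: rest ∧ ts2 = pre ++ y :: rest ∧ pvRel x y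

def pvOkA (t1 t2 : List String) : Bool :=
  !(t1.length != t2.length) &&
  (((t1.zip t2).filter (fun xy => xy.1 != xy.2)).length == 1 &&
   (match ((t1.zip t2).filter (fun xy => xy.1 != xy.2)).head? with
    | some (x, y) =>
      (PySem.Str.startswith x "!" && (y == PySem.Str.slice x (some 1) none)) ||
      (PySem.Str.startswith y "!" && (x == PySem.Str.slice y (some 1) none))
    | none => false))

theorem pvOkA_iff_Match (t1 t2 : List String) : pvOkA t1 t2 = true ↔ pvMatch t1 t2 := by
  unfold pvOkA
  constructor
  · intro h
    simp only [Bool.and_eq_true, Bool.not_eq_eq_eq_not, Bool.not_true, bne_eq_false_iff_eq,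
      beq_iff_eq] at h
    obtain ⟨hlen, hone, hrel⟩ := h
    obtain ⟨xy, hxy⟩ := List.length_eq_one_iff.mp hone
    rcases xy with ⟨x, y⟩
    rw [hxy] at hrel
    simp only [List.head?_cons] at hrel
    obtain ⟨pre, rest, h1, h2⟩ := pv_zipfilter_singleton_inv t1 t2 hlen x y hxy
    refine ⟨pre, x, y, rest, h1, h2, ?_⟩
    simp only [Bool.or_eq_true] at hrel
    rcases hrel with h | h
    · exact Or.inr ((pv_startswith_slice_iff x y).mp h)
    · exact Or.inl ((pv_startswith_slice_iff y x).mp h)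
  · rintro ⟨pre, x, y, rest, h1, h2, hrel⟩
    subst h1; subst h2
    have hne : x ≠ y := pvRel_ne hrel
    rw [pv_zipfilter_singleton pre rest x y hne]
    simp only [Bool.and_eq_true, List.head?_cons, Bool.or_eq_true]
    refine ⟨by simp, by simp, ?_⟩
    rcases hrel with h | h
    · exact Or.inr (Bool.and_eq_true _ _ ▸ (pv_startswith_slice_iff y x).mpr h)
    · exact Or.inl (Bool.and_eq_true _ _ ▸ (pv_startswith_slice_iff x y).mpr h)

theorem pv_mstrB_eq (pre rest : List String) (x y : String) (hne : x ≠ y) :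
    ((((pre ++ x :: rest).zip (pre ++ y :: rest)).filter (fun xy => xy.1 == xy.2)).map (·.1)) =
      pre ++ rest := by
  rw [List.zip_append rfl, List.filter_append, pv_zip_self_filter_eq]
  rw [List.zip_cons_cons, List.filter_cons, if_neg (by simp [hne]), pv_zip_self_filter_eq]
  rw [List.map_append]
  congr 1 <;> [skip; skip] <;> first
    | (induction pre with
       | nil => rfl
       | cons a l ih => simp [List.zip_cons_cons, ih])
    | (induction rest with
       | nil => rfl
       | cons a l ih => simp [List.zip_cons_cons, ih])


-- the tail part: tokens all equal, none blanked, all kept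
theorem pv_mstrA_tail (rest : List String) (hr : ∀ t ∈ rest, t ≠ "") :
    (((rest.zip ((rest.zip rest).map (fun xy => xy.1 != xy.2))).map
      (fun xd => if !xd.2 then xd.1 else "")).filter (fun s => !(s == ""))) = rest := by
  induction rest with
  | nil => rfl
  | cons a l ih =>
    simp only [List.zip_cons_cons, List.map_cons, bne_self_eq_false, Bool.not_false, if_true,
      List.filter_cons]
    rw [if_pos (by simpa using hr a (by simp))]
    rw [ih (fun t ht => hr t (by simp [ht]))]

theorem pv_mstrA_eq (pre rest : List String) (x y : String) (hne : x ≠ y)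
    (hp : ∀ t ∈ pre, t ≠ "") (hr : ∀ t ∈ rest, t ≠ "") :
    ((((pre ++ x :: rest).zip
        (((pre ++ x :: rest).zip (pre ++ y :: rest)).map (fun xy => xy.1 != xy.2))).map
      (fun xd => if !xd.2 then xd.1 else "")).filter (fun s => !(s == ""))) = pre ++ rest := by
  induction pre with
  | nil =>
    simp only [List.nil_append, List.zip_cons_cons, List.map_cons, List.filter_cons]
    rw [if_neg (by simp [hne])]
    exact pv_mstrA_tail rest hr
  | cons a l ih =>
    simp only [List.cons_append, List.zip_cons_cons, List.map_cons, bne_self_eq_false,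
      Bool.not_false, if_true, List.filter_cons]
    rw [if_pos (by simpa using hp a (by simp))]
    rw [ih (fun t ht => hp t (by simp [ht]))]

theorem pv_pyRange_pairwise (a b : Int) : (PySem.List.pyRange a b).Pairwise (· < ·) := by
  by_cases h : a < b
  · rw [PySem.List.pyRange_one_cons h]
    refine List.Pairwise.cons ?_ (pv_pyRange_pairwise (a + 1) b)
    intro x hx
    rw [PySem.List.mem_pyRange_one] at hx
    omega
  · have : PySem.List.pyRange a b = [] := by
      rw [List.eq_nil_iff_forall_not_mem]
      intro x hx
      rw [PySem.List.mem_pyRange_one] at hx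
      omega
    rw [this]
    exact List.Pairwise.nil
termination_by (b - a).toNat
decreasing_by omega


theorem pv_index_getD (toks : List (List String)) (k : Int × List String × List String × String) :
    (pvB_index toks).getD k [] = ((pvB_entries toks).filter (fun e => e.1 == k)).map (·.2) := by
  unfold pvB_index
  rw [PySem.Dict.getD_foldl_modify_append]
  simp [PySem.Dict.getD_empty]

-- key of the entry for position pn of toks[jn], written with take/drop
theorem pv_key_natCast (ts : List String) (pn : Nat) (t : String) :
    pvB_key ts (pn : Int) t = ((pn : Int), ts.take pn, ts.drop (pn + 1), t) := by
  unfold pvB_key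
  rw [PySem.List.slice_to ts (by positivity), PySem.List.slice_from ts (by positivity)]
  have h1 : ((pn : Int)).toNat = pn := by omega
  have h2 : ((pn : Int) + 1).toNat = pn + 1 := by omega
  rw [h1, h2]

theorem pv_mem_entries (toks : List (List String)) (k : Int × List String × List String × String)
    (j : Int) :
    (k, j) ∈ pvB_entries toks ↔
      ∃ jn : Nat, ∃ hj : jn < toks.length, j = (jn : Int) ∧
        ∃ pn : Nat, ∃ hp : pn < (toks[jn]).length,
          k = ((pn : Int), (toks[jn]).take pn, (toks[jn]).drop (pn + 1), (toks[jn])[pn]) := by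
  unfold pvB_entries
  rw [List.mem_flatMap]
  constructor
  · rintro ⟨jts, hjts, hmem⟩
    rw [PySem.List.mem_enumerate_iff] at hjts
    obtain ⟨jn, hj, hjts⟩ := hjts
    rw [List.mem_map] at hmem
    obtain ⟨pt, hpt, hent⟩ := hmem
    rw [PySem.List.mem_enumerate_iff] at hpt
    obtain ⟨pn, hp, hpt⟩ := hpt
    subst hjts
    subst hpt
    simp only [Prod.mk.injEq, zero_add] at hent hp
    refine ⟨jn, hj, hent.2.symm, pn, hp, ?_⟩
    rw [← hent.1, pv_key_natCast]
  · rintro ⟨jn, hj, hjn, pn, hp, hk⟩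
    refine ⟨((jn : Int), toks[jn]), ?_, ?_⟩
    · rw [PySem.List.mem_enumerate_iff]
      exact ⟨jn, hj, by simp⟩
    · rw [List.mem_map]
      refine ⟨((pn : Int), (toks[jn])[pn]), ?_, ?_⟩
      · rw [PySem.List.mem_enumerate_iff]
        exact ⟨pn, hp, by simp⟩
      · rw [pv_key_natCast, hk, hjn]

-- list decomposition helpers
theorem pv_take_mid {α : Type} (pre rest : List α) (x : α) :
    (pre ++ x :: rest).take pre.length = pre := by
  simpa using List.take_left pre (x :: rest)

theorem pv_drop_mid {α : Type} (pre rest : List α) (x : α) :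
    (pre ++ x :: rest).drop (pre.length + 1) = rest := by
  have : pre ++ x :: rest = (pre ++ [x]) ++ rest := by simp
  rw [this]
  have h2 : pre.length + 1 = (pre ++ [x]).length := by simp
  rw [h2, List.drop_left]

theorem pv_get_mid {α : Type} (pre rest : List α) (x : α)
    (h : pre.length < (pre ++ x :: rest).length) : (pre ++ x :: rest)[pre.length] = x := by
  rw [List.getElem_append_right (by omega)]
  simp

theorem pv_decomp {α : Type} (l : List α) (k : Nat) (h : k < l.length) :
    l = l.take k ++ l[k] :: l.drop (k + 1) := by
  conv_lhs => rw [← List.take_append_drop k l]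
  congr 1
  rw [← List.getElem_cons_drop]

-- generic characterizations of the partner-collecting folds
theorem pv_foldl_mem_char {β : Type} (F : PySem.Set Int → β → PySem.Set Int) (Q : β → Int → Prop)
    (hF : ∀ pr b x, x ∈ F pr b ↔ x ∈ pr ∨ Q b x) (l : List β) (pr : PySem.Set Int) (x : Int) :
    x ∈ l.foldl F pr ↔ x ∈ pr ∨ ∃ b ∈ l, Q b x := by
  induction l generalizing pr with
  | nil => simp
  | cons b l ih =>
    rw [List.foldl_cons, ih, hF]
    constructor
    · rintro ((h | h) | ⟨b', hb', h⟩)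
      · exact Or.inl h
      · exact Or.inr ⟨b, by simp, h⟩
      · exact Or.inr ⟨b', by simp [hb'], h⟩
    · rintro (h | ⟨b', hb', h⟩)
      · exact Or.inl (Or.inl h)
      · rcases List.mem_cons.mp hb' with he | hm
        · subst he; exact Or.inl (Or.inr h)
        · exact Or.inr ⟨b', hm, h⟩

theorem pv_foldl_nodup {β : Type} (F : PySem.Set Int → β → PySem.Set Int)
    (hF : ∀ pr b, pr.Nodup → (F pr b).Nodup) (l : List β) (pr : PySem.Set Int)
    (h : pr.Nodup) : (l.foldl F pr).Nodup := by
  induction l generalizing pr with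
  | nil => exact h
  | cons b l ih => exact ih (F pr b) (hF pr b h)

theorem pv_guard_mem (i : Int) (l : List Int) (pr : PySem.Set Int) (x : Int) :
    x ∈ l.foldl (fun pr j => if i < j then pr.add j else pr) pr ↔
      x ∈ pr ∨ (x ∈ l ∧ i < x) := by
  rw [pv_foldl_mem_char (fun pr j => if i < j then pr.add j else pr) (fun j x => x = j ∧ i < j)
    (by
      intro pr b x
      by_cases hb : i < b
      · simp [PySem.Set.mem_add, hb]
      · simp only [if_neg hb]
        constructor
        · exact Or.inl
        · rintro (h | ⟨he, hlt⟩)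
          · exact h
          · exact absurd hlt (he ▸ hb)) l pr x]
  constructor
  · rintro (h | ⟨j, hj, he, hlt⟩)
    · exact Or.inl h
    · exact Or.inr ⟨he ▸ hj, he ▸ hlt⟩
  · rintro (h | ⟨hm, hlt⟩)
    · exact Or.inl h
    · exact Or.inr ⟨x, hm, rfl, hlt⟩

theorem pv_mem_partners_raw (index : PySem.Dict (Int × List String × List String × String) (List Int))
    (i : Int) (ts : List String) (x : Int) :
    x ∈ pvB_partners index i ts ↔
      ∃ pt ∈ PySem.List.enumerate ts, ∃ c ∈ pvB_cands pt.2,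
        x ∈ index.getD (pvB_key ts pt.1 c) [] ∧ i < x := by
  unfold pvB_partners
  rw [pv_foldl_mem_char _
    (fun pt x => ∃ c ∈ pvB_cands pt.2, x ∈ index.getD (pvB_key ts pt.1 c) [] ∧ i < x)
    (by
      intro pr pt x
      rw [pv_foldl_mem_char _ (fun c x => x ∈ index.getD (pvB_key ts pt.1 c) [] ∧ i < x)
        (by
          intro pr c x
          rw [pv_guard_mem])])]
  simp

theorem pv_partners_nodup (index : PySem.Dict (Int × List String × List String × String) (List Int))
    (i : Int) (ts : List String) : (pvB_partners index i ts).Nodup := by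
  unfold pvB_partners
  refine pv_foldl_nodup _ ?_ _ _ List.nodup_nil
  intro pr pt h
  refine pv_foldl_nodup _ ?_ _ _ h
  intro pr c h
  refine pv_foldl_nodup _ ?_ _ _ h
  intro pr j h
  split
  · exact PySem.Set.nodup_add pr j h
  · exact h

theorem pv_bang_append_toList (t : String) : ("!" ++ t).toList = '!' :: t.toList := by
  rw [String.toList_append]
  rfl

theorem pv_mem_partners (toks : List (List String)) (i : Int) (ts : List String) (x : Int) :
    x ∈ pvB_partners (pvB_index toks) i ts ↔
      i < x ∧ ∃ xn : Nat, ∃ hx : xn < toks.length, x = (xn : Int) ∧ pvMatch ts toks[xn] := by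
  rw [pv_mem_partners_raw]
  constructor
  · rintro ⟨pt, hpt, c, hc, hlook, hix⟩
    refine ⟨hix, ?_⟩
    rw [PySem.List.mem_enumerate_iff] at hpt
    obtain ⟨pk, hpk, hpt⟩ := hpt
    subst hpt
    simp only [zero_add] at hc hlook ⊢
    rw [pv_index_getD, List.mem_map] at hlook
    obtain ⟨e, he, hex⟩ := hlook
    rw [List.mem_filter] at he
    obtain ⟨hent, hkey⟩ := he
    have hkey' : e.1 = pvB_key ts (pk : Int) c := beq_iff_eq.mp hkey
    have he' : (pvB_key ts (pk : Int) c, x) ∈ pvB_entries toks := by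
      have hee : e = (pvB_key ts (pk : Int) c, x) := by
        rw [← hkey', ← hex]
      rwa [hee] at hent
    rw [pv_mem_entries] at he'
    obtain ⟨jn, hj, hxj, pn, hp, hk⟩ := he'
    rw [pv_key_natCast] at hk
    simp only [Prod.mk.injEq] at hk
    obtain ⟨hpp, htake, hdrop, hcc⟩ := hk
    have hppn : pk = pn := by exact_mod_cast hpp
    subst hppn
    refine ⟨jn, hj, hxj, ts.take pk, ts[pk], (toks[jn])[pk], ts.drop (pk + 1), ?_, ?_, ?_⟩
    · exact pv_decomp ts pk hpk
    · conv_lhs => rw [pv_decomp toks[jn] pk hp]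
      rw [← htake, ← hdrop]
    · simp only [pvB_cands, List.mem_append, List.mem_singleton] at hc
      rcases hc with hc | hc
      · subst hc
        exact Or.inl (by rw [← hcc, pv_bang_append_toList])
      · split at hc
        · rename_i hsw
          simp only [List.mem_singleton] at hc
          subst hc
          refine Or.inr ?_
          apply (pv_startswith_slice_iff ts[pk] (toks[jn])[pk]).mp
          rw [Bool.and_eq_true]
          exact ⟨hsw, beq_iff_eq.mpr hcc.symm⟩
        · simp at hc
  · rintro ⟨hix, xn, hxn, hxx, pre, x0, y, rest, hts, htj, hrel⟩
    subst hts
    have hpk : pre.length < (pre ++ x0 :: rest).length := by simp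
    have hget : (pre ++ x0 :: rest)[pre.length] = x0 := pv_get_mid pre rest x0 hpk
    have hcy : ∃ c ∈ pvB_cands x0, c = y := by
      rcases hrel with h | h
      · refine ⟨"!" ++ x0, by simp [pvB_cands], ?_⟩
        apply String.toList_inj.mp
        rw [pv_bang_append_toList, h]
      · have hb := (pv_startswith_slice_iff x0 y).mpr h
        rw [Bool.and_eq_true] at hb
        refine ⟨PySem.Str.slice x0 (some 1) none, ?_, (beq_iff_eq.mp hb.2).symm⟩
        unfold pvB_cands
        rw [if_pos hb.1]
        simp
    obtain ⟨c, hc, hcyy⟩ := hcy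
    refine ⟨((pre.length : Int), x0), ?_, c, hc, ?_, hix⟩
    · rw [PySem.List.mem_enumerate_iff]
      exact ⟨pre.length, hpk, by simp [hget]⟩
    · rw [pv_index_getD, List.mem_map]
      refine ⟨(pvB_key (pre ++ x0 :: rest) (pre.length : Int) c, x), ?_, rfl⟩
      rw [List.mem_filter]
      refine ⟨?_, by simp⟩
      rw [pv_mem_entries]
      have hp' : pre.length < (toks[xn]).length := by rw [htj]; simp
      refine ⟨xn, hxn, hxx, pre.length, hp', ?_⟩
      rw [pv_key_natCast]
      have h3 : (toks[xn]).take pre.length = pre := by rw [htj]; exact pv_take_mid pre rest y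
      have h4 : (toks[xn]).drop (pre.length + 1) = rest := by rw [htj]; exact pv_drop_mid pre rest y
      have h5 : (toks[xn])[pre.length]'hp' = y := by
        have hpj : pre.length < (pre ++ y :: rest).length := by simp
        have := pv_get_mid pre rest y hpj
        rw [← this]
        congr 1
      rw [h3, h4, h5, pv_take_mid, pv_drop_mid, hcyy]

theorem pv_split0_empty : PySem.Str.split₀ "" = [] := by decide

theorem pv_toks_getD (parts : List String) (j : Int) :
    PySem.List.pyGetD (parts.map PySem.Str.split₀) j [] =
      PySem.Str.split₀ (PySem.List.pyGetD parts j "") := by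
  have h := PySem.List.pyGetD_map PySem.Str.split₀ parts j ""
  rw [pv_split0_empty] at h
  exact h

theorem pv_len_eq (parts : List String) : PySem.List.len parts = (parts.length : Int) := by
  simp [PySem.List.len]

theorem pv_pyGetD_getElem {α : Type} (l : List α) (n : Nat) (h : n < l.length) (d : α) :
    PySem.List.pyGetD l (n : Int) d = l[n] := by
  rw [PySem.List.pyGetD_natCast, List.getD_eq_getElem]

theorem pv_sorted_partners (parts : List String) (i : Int) (hi : 0 ≤ i) :
    PySem.List.sorted (pvB_partners (pvB_index (parts.map PySem.Str.split₀)) i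
        (PySem.List.pyGetD (parts.map PySem.Str.split₀) i [])) (fun x => x) false =
      (PySem.List.pyRange (i + 1) (PySem.List.len parts)).filter
        (fun j => pvOkA (PySem.Str.split₀ (PySem.List.pyGetD parts i ""))
          (PySem.Str.split₀ (PySem.List.pyGetD parts j ""))) := by
  apply PySem.List.sorted_eq_of_perm_of_pairwise_lt
  · rw [List.perm_ext_iff_of_nodup
      (((pv_pyRange_pairwise _ _).filter _).imp (fun h => ne_of_lt h))
      (pv_partners_nodup _ _ _)]
    intro a
    rw [List.mem_filter, PySem.List.mem_pyRange_one, pv_mem_partners]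
    constructor
    · rintro ⟨⟨ha1, ha2⟩, hok⟩
      refine ⟨by omega, a.toNat, ?_, by omega, ?_⟩
      · rw [pv_len_eq] at ha2
        simp [List.length_map]
        omega
      · rw [← pvOkA_iff_Match]
        rw [← pv_toks_getD, ← pv_toks_getD] at hok
        have hcast : ((a.toNat : Nat) : Int) = a := by omega
        have hlt : a.toNat < (parts.map PySem.Str.split₀).length := by
          rw [pv_len_eq] at ha2
          simp only [List.length_map]
          omega
        rw [← pv_pyGetD_getElem _ _ hlt, hcast]
        exact hok
    · rintro ⟨hia, xn, hxn, hxx, hm⟩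
      rw [← pvOkA_iff_Match] at hm
      subst hxx
      refine ⟨⟨by omega, ?_⟩, ?_⟩
      · rw [pv_len_eq]
        rw [List.length_map] at hxn
        omega
      · rw [← pv_toks_getD, ← pv_toks_getD, pv_pyGetD_getElem _ _ hxn]
        exact hm
  · exact ((pv_pyRange_pairwise _ _).filter _).imp (fun h => h)

def pvUpdA (parts : List String) (part1 : List String) (i : Int)
    (st : List String × PySem.Set Int) (j : Int) : List String × PySem.Set Int :=
  let part2 := PySem.Str.split₀ (PySem.List.pyGetD parts j "")
  (st.1 ++ [PySem.Str.join " "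
      (((part1.zip ((part1.zip part2).map (fun xy => xy.1 != xy.2))).map
        (fun xd => if !xd.2 then xd.1 else "")).filter (fun s => !(s == "")))],
   PySem.Set.add (PySem.Set.add st.2 i) j)

theorem pvA_inner_eq (parts : List String) (part1 : List String) (i : Int)
    (st : List String × PySem.Set Int) (j : Int) :
    pvA_inner parts part1 i st j =
      if pvOkA part1 (PySem.Str.split₀ (PySem.List.pyGetD parts j "")) then
        pvUpdA parts part1 i st j
      else st := by
  unfold pvA_inner pvUpdA pvOkA
  set part2 := PySem.Str.split₀ (PySem.List.pyGetD parts j "") with hp2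
  by_cases h1 : (part1.length != part2.length) = true
  · rw [if_pos h1]
    simp only [h1, Bool.not_true, Bool.false_and, if_neg (by simp : ¬(false = true))]
  · rw [if_neg h1]
    rw [Bool.not_eq_true] at h1
    simp only [h1, Bool.not_false, Bool.true_and]

theorem pv_outer_eq (parts : List String) (st : List String × PySem.Set Int) (i : Int)
    (hi : i ∈ PySem.List.pyRange 0 (PySem.List.len parts)) :
    pvA_outer parts st i =
      pvB_body (parts.map PySem.Str.split₀) (pvB_index (parts.map PySem.Str.split₀)) st
        (i, PySem.List.pyGetD (parts.map PySem.Str.split₀) i []) := by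
  rw [PySem.List.mem_pyRange_one] at hi
  unfold pvA_outer pvB_body
  have hfun : pvA_inner parts (PySem.Str.split₀ (PySem.List.pyGetD parts i "")) i =
      fun st j =>
        if pvOkA (PySem.Str.split₀ (PySem.List.pyGetD parts i ""))
            (PySem.Str.split₀ (PySem.List.pyGetD parts j "")) = true then
          pvUpdA parts (PySem.Str.split₀ (PySem.List.pyGetD parts i "")) i st j
        else st := by
    funext st j
    exact pvA_inner_eq parts _ i st j
  rw [hfun, PySem.List.foldl_if_eq_foldl_filter, pv_sorted_partners parts i hi.1]
  apply (PySem.List.foldl_congr_mem _ _ _ _ ?_).symm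
  intro acc j hj
  rw [List.mem_filter, PySem.List.mem_pyRange_one] at hj
  obtain ⟨⟨hj1, hj2⟩, hok⟩ := hj
  -- both sides emit the merged string for the matching pair (i, j)
  obtain ⟨pre, x0, y, rest, hts, htj, hrel⟩ := (pvOkA_iff_Match _ _).mp hok
  have hne : x0 ≠ y := pvRel_ne hrel
  unfold pvB_emit pvUpdA
  simp only [pv_toks_getD]
  rw [hts, htj]
  rw [pv_mstrA_eq pre rest x0 y hne
      (fun t ht => pv_tok_ne_nil _ t (by rw [hts]; exact List.mem_append_left _ ht))
      (fun t ht => pv_tok_ne_nil _ t (by rw [hts]; exact List.mem_append_right _ (by simp [ht])))]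
  rw [pv_mstrB_eq pre rest x0 y hne]

theorem pv_merge_eq (parts : List String) : merge_parts parts = merge_parts_alt parts := by
  unfold merge_parts merge_parts_alt
  have hst : (PySem.List.pyRange 0 (PySem.List.len parts)).foldl (pvA_outer parts)
        ([], PySem.Set.empty) =
      (PySem.List.enumerate (parts.map PySem.Str.split₀)).foldl
        (pvB_body (parts.map PySem.Str.split₀) (pvB_index (parts.map PySem.Str.split₀)))
        ([], PySem.Set.empty) := by
    rw [PySem.List.enumerate_eq_map_pyRange (parts.map PySem.Str.split₀) []]
    rw [List.foldl_map]
    have hlen : PySem.List.len (parts.map PySem.Str.split₀) = PySem.List.len parts := by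
      simp [PySem.List.len]
    rw [hlen]
    apply PySem.List.foldl_congr_mem
    intro acc i hi
    exact pv_outer_eq parts acc i hi
  rw [hst]
  have hdd : pvA_dedup = pvB_dedup := by
    funext st e
    rfl
  rw [hdd]

-- ===== VERDICT (by name: the statement is the Claim_ definition above) =====
theorem merge_parts_spec : Claim_equal_merge_parts := by
  intro parts _
  unfold Spec_merge_parts
  exact pv_merge_eq parts
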